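-- pv_equiv track=rewrite | github.com/Akshu1245/devpulse | devpulse-backend/services/change_detector.py | _diff_schemas
-- ===== SOURCE A (Python) =====
-- from typing import Dict, Any, List, Optional
--
-- def _diff_schemas(old_schema: Dict[str, str], new_schema: Dict[str, str]) -> Dict[str, Any]:
--     old_keys, new_keys = set(old_schema.keys()), set(new_schema.keys())
--     added = sorted(new_keys - old_keys)
--     removed = sorted(old_keys - new_keys)
--     type_changed = [
--         {"path": k, "old_type": old_schema[k], "new_type": new_schema[k]}
--         for k in sorted(old_keys & new_keys) if old_schema[k] != new_schema[k]
--     ]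
--     return {
--         "added": [{"path": p, "type": new_schema[p]} for p in added],
--         "removed": [{"path": p, "type": old_schema[p]} for p in removed],
--         "type_changed": type_changed,
--     }
-- ===== SOURCE B (Python) =====
-- def _diff_schemas(old_schema, new_schema):
--     # Sort-then-merge: one simultaneous two-pointer scan over the two key-sorted
--     # item lists classifies every field; results come out already sorted.
--     olds = sorted(old_schema.items(), key=lambda kv: kv[0])
--     news = sorted(new_schema.items(), key=lambda kv: kv[0])
--     added, removed, type_changed = [], [], []
--     i = j = 0
--     while i < len(olds) and j < len(news):
--         ok, ov = olds[i]
--         nk, nv = news[j]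
--         if ok == nk:
--             if ov != nv:
--                 type_changed.append({"path": ok, "old_type": ov, "new_type": nv})
--             i += 1
--             j += 1
--         elif ok < nk:
--             removed.append({"path": ok, "type": ov})
--             i += 1
--         else:
--             added.append({"path": nk, "type": nv})
--             j += 1
--     for k, v in olds[i:]:
--         removed.append({"path": k, "type": v})
--     for k, v in news[j:]:
--         added.append({"path": k, "type": v})
--     return {"added": added, "removed": removed, "type_changed": type_changed}
-- ===== Notes on version B (the rewrite author's own statement) =====
-- stated objective: alternative
-- what changed: Replaces A's set differences/intersection plus three per-result sorted() comprehensions by sorting the two item lists once and classifying every field in a single two-pointer merge scan, which emits added/removed/type_changed already in sorted order with no membership tests and no per-result sorts.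
import Mathlib
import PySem

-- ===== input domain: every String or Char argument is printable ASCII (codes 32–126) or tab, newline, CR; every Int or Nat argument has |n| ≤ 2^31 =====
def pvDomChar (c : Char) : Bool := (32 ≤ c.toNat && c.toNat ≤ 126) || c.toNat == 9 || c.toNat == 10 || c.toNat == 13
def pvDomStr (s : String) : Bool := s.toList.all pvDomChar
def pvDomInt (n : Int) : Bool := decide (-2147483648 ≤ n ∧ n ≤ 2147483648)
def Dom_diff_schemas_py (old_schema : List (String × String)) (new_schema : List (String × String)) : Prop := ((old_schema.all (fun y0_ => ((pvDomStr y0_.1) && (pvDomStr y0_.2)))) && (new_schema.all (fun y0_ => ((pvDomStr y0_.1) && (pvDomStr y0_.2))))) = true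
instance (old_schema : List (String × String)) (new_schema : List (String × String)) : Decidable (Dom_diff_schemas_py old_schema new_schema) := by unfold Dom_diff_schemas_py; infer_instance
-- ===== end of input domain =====

-- B replaces A's set-difference/intersection constructions and three sorted comprehensions
-- by one sort of each item list followed by a single two-pointer merge scan
-- (objective: alternative decomposition; same asymptotic cost).

-- ===== PORT A =====
def diff_schemas_py (old_schema : List (String × String)) (new_schema : List (String × String)) : List (String × List (List (String × String))) :=
  let dOld := PySem.Dict.mk old_schema
  let dNew := PySem.Dict.mk new_schema
  let old_keys : PySem.Set String := PySem.Set.ofList dOld.keys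
  let new_keys : PySem.Set String := PySem.Set.ofList dNew.keys
  let added := PySem.List.sorted (PySem.Set.diff new_keys old_keys) (fun x => x) false
  let removed := PySem.List.sorted (PySem.Set.diff old_keys new_keys) (fun x => x) false
  let type_changed :=
    ((PySem.List.sorted (PySem.Set.inter old_keys new_keys) (fun x => x) false).filter
        (fun k => dOld.getD k "" != dNew.getD k "")).map
      (fun k => [("path", k), ("old_type", dOld.getD k ""), ("new_type", dNew.getD k "")])
  [("added", added.map (fun p => [("path", p), ("type", dNew.getD p "")])),
   ("removed", removed.map (fun p => [("path", p), ("type", dOld.getD p "")])),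
   ("type_changed", type_changed)]

-- ===== PORT B =====
-- B's while loop over the two sorted item lists, as the obvious recursion on the two lists;
-- the trailing 'for' loops over olds[i:] / news[j:] are the one-sided base cases.
def pvMerge : List (String × String) → List (String × String) →
    List (List (String × String)) × List (List (String × String)) × List (List (String × String))
  | [], news => (news.map (fun kv => [("path", kv.1), ("type", kv.2)]), [], [])
  | x :: xs, [] => ([], (x :: xs).map (fun kv => [("path", kv.1), ("type", kv.2)]), [])
  | x :: xs, y :: ys =>
    if x.1 = y.1 then
      let r := pvMerge xs ys
      (r.1, r.2.1,
       if x.2 ≠ y.2 then [("path", x.1), ("old_type", x.2), ("new_type", y.2)] :: r.2.2 else r.2.2)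
    else if x.1 < y.1 then
      let r := pvMerge xs (y :: ys)
      (r.1, [("path", x.1), ("type", x.2)] :: r.2.1, r.2.2)
    else
      let r := pvMerge (x :: xs) ys
      ([("path", y.1), ("type", y.2)] :: r.1, r.2.1, r.2.2)
  termination_by xs ys => xs.length + ys.length

def diff_schemas_py_alt (old_schema : List (String × String)) (new_schema : List (String × String)) : List (String × List (List (String × String))) :=
  let olds := PySem.List.sorted old_schema (fun kv => kv.1) false
  let news := PySem.List.sorted new_schema (fun kv => kv.1) false
  let r := pvMerge olds news
  [("added", r.1), ("removed", r.2.1), ("type_changed", r.2.2)]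

-- ===== PRECONDITION & SPEC =====
-- Pre_ excludes only association lists with a duplicated key: they do not represent any
-- Python dict (dict keys are unique), so no Python input is excluded.
def Pre_diff_schemas_py (old_schema : List (String × String)) (new_schema : List (String × String)) : Prop :=
  (old_schema.map Prod.fst).Nodup ∧ (new_schema.map Prod.fst).Nodup
instance (old_schema : List (String × String)) (new_schema : List (String × String)) : Decidable (Pre_diff_schemas_py old_schema new_schema) := by unfold Pre_diff_schemas_py; infer_instance

def pvWitness_diff_schemas_py : (List (String × String)) × (List (String × String)) :=
  ([("a", "int"), ("b", "str")], [("b", "int"), ("c", "str")])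

def Spec_diff_schemas_py (old_schema : List (String × String)) (new_schema : List (String × String)) (out : List (String × List (List (String × String)))) : Prop := out = diff_schemas_py_alt old_schema new_schema
instance (old_schema : List (String × String)) (new_schema : List (String × String)) (out : List (String × List (List (String × String)))) : Decidable (Spec_diff_schemas_py old_schema new_schema out) := by unfold Spec_diff_schemas_py; infer_instance

-- ===== CLAIM (what is proved, stated in full; the proofs are below) =====
def Claim_equal_diff_schemas_py : Prop := ∀ (old_schema : List (String × String)) (new_schema : List (String × String)), Dom_diff_schemas_py old_schema new_schema → Pre_diff_schemas_py old_schema new_schema → Spec_diff_schemas_py old_schema new_schema (diff_schemas_py old_schema new_schema)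

-- ===== LEMMAS AND PROOFS =====

-- sort key d["path"]: every record either port builds carries "path" first, so "" is never used
def pvPathKey (r : List (String × String)) : String := (PySem.Dict.mk r).getD "path" ""

theorem pv_key_eval (k : String) (r : List (String × String)) :
    pvPathKey (("path", k) :: r) = k := by
  simp [pvPathKey, PySem.Dict.getD_eq_get?_getD, PySem.Dict.get?_mk_cons]

-- pairwise ≤ plus nodup gives pairwise <
theorem pv_pairwise_lt_of_le_nodup (m : List String) (h1 : m.Pairwise (· ≤ ·)) (h2 : m.Nodup) :
    m.Pairwise (· < ·) :=
  (h1.and h2).imp (fun hab => lt_of_le_of_ne hab.1 hab.2)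

-- sorted of a duplicate-free list under the identity key is strictly increasing
theorem pv_sorted_lt (m : List String) (h : m.Nodup) :
    (PySem.List.sorted m (fun x => x) false).Pairwise (· < ·) :=
  pv_pairwise_lt_of_le_nodup _ (PySem.List.sorted_pairwise m (fun x => x))
    (((PySem.List.sorted_perm m (fun x => x) false).nodup_iff).2 h)

-- sorting records by their "path" = mapping the already path-sorted key list
theorem pv_sorted_records (s : List String) (hpw : s.Pairwise (· < ·))
    (g : String → List (String × String)) (hkey : ∀ k ∈ s, pvPathKey (g k) = k)
    (l : List (List (String × String))) (hperm : (s.map g).Perm l) :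
    PySem.List.sorted l pvPathKey false = s.map g := by
  apply PySem.List.sorted_eq_of_perm_of_pairwise_lt l (s.map g) pvPathKey hperm
  rw [List.pairwise_map]
  exact hpw.imp_of_mem (fun {a b} ha hb hlt => by rw [hkey a ha, hkey b hb]; exact hlt)

-- Dict.mk membership and lookup facts
theorem pv_contains_iff (l : List (String × String)) (x : String) :
    (PySem.Dict.mk l).contains x = true ↔ ∃ a ∈ l, a.1 = x := by
  rw [PySem.Dict.contains_iff_mem_keys, PySem.Dict.keys_mk]
  simp

theorem pv_getD_self (l : List (String × String)) (hl : (l.map Prod.fst).Nodup)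
    (kv : String × String) (h : kv ∈ l) : (PySem.Dict.mk l).getD kv.1 "" = kv.2 :=
  PySem.Dict.getD_of_mem_items _ (by simpa using h) (by rw [PySem.Dict.keys_mk]; exact hl) ""

theorem pv_contains_head (a : String × String) (l : List (String × String)) :
    (PySem.Dict.mk (a :: l)).contains a.1 = true :=
  (pv_contains_iff _ _).2 ⟨a, List.mem_cons_self, rfl⟩

theorem pv_contains_cons_ne (a : String × String) (l : List (String × String)) (k : String)
    (h : k ≠ a.1) : (PySem.Dict.mk (a :: l)).contains k = (PySem.Dict.mk l).contains k := by
  rw [Bool.eq_iff_iff, pv_contains_iff, pv_contains_iff]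
  constructor
  · rintro ⟨p, hp, rfl⟩
    rcases List.mem_cons.1 hp with rfl | hp'
    · exact absurd rfl h
    · exact ⟨p, hp', rfl⟩
  · rintro ⟨p, hp, rfl⟩
    exact ⟨p, List.mem_cons_of_mem _ hp, rfl⟩

theorem pv_contains_not_mem (l : List (String × String)) (k : String)
    (h : ∀ p ∈ l, p.1 ≠ k) : (PySem.Dict.mk l).contains k = false := by
  rw [Bool.eq_false_iff, Ne, pv_contains_iff]
  rintro ⟨p, hp, rfl⟩
  exact h p hp rfl

theorem pv_getD_head (a : String × String) (l : List (String × String)) (d : String) :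
    (PySem.Dict.mk (a :: l)).getD a.1 d = a.2 := by
  rcases a with ⟨k, v⟩
  simp [PySem.Dict.getD_eq_get?_getD, PySem.Dict.get?_mk_cons]

theorem pv_getD_cons_ne (a : String × String) (l : List (String × String)) (k d : String)
    (h : k ≠ a.1) : (PySem.Dict.mk (a :: l)).getD k d = (PySem.Dict.mk l).getD k d := by
  rcases a with ⟨a1, a2⟩
  rw [PySem.Dict.getD_eq_get?_getD, PySem.Dict.getD_eq_get?_getD, PySem.Dict.get?_mk_cons,
    if_neg (by simpa using (Ne.symm h))]

-- dicts over permuted association lists agree on every lookup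
theorem pv_dict_perm_contains (l l' : List (String × String)) (hp : l.Perm l') (k : String) :
    (PySem.Dict.mk l).contains k = (PySem.Dict.mk l').contains k := by
  rw [Bool.eq_iff_iff, pv_contains_iff, pv_contains_iff]
  exact ⟨fun ⟨p, hm, he⟩ => ⟨p, hp.mem_iff.1 hm, he⟩, fun ⟨p, hm, he⟩ => ⟨p, hp.mem_iff.2 hm, he⟩⟩

theorem pv_dict_perm_getD (l l' : List (String × String)) (hp : l.Perm l')
    (hnd : (l.map Prod.fst).Nodup) (k : String) :
    (PySem.Dict.mk l).getD k "" = (PySem.Dict.mk l').getD k "" := by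
  have hnd' : (l'.map Prod.fst).Nodup := ((hp.map Prod.fst).nodup_iff).1 hnd
  by_cases hc : ∃ p ∈ l, p.1 = k
  · obtain ⟨p, hm, rfl⟩ := hc
    rw [pv_getD_self l hnd p hm, pv_getD_self l' hnd' p (hp.mem_iff.1 hm)]
  · have h1 : ∀ p ∈ l, p.1 ≠ k := fun p hm he => hc ⟨p, hm, he⟩
    rw [PySem.Dict.getD_of_not_contains _ "" (pv_contains_not_mem l k h1),
      PySem.Dict.getD_of_not_contains _ ""
        (pv_contains_not_mem l' k (fun p hm he => hc ⟨p, hp.mem_iff.2 hm, he⟩))]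

-- head-key bound extracted from a strictly key-sorted cons
theorem pv_head_lt (a : String × String) (l : List (String × String))
    (h : ((a :: l).map Prod.fst).Pairwise (· < ·)) : ∀ p ∈ l, a.1 < p.1 := by
  rw [List.map_cons, List.pairwise_cons] at h
  intro p hp
  exact h.1 p.1 (List.mem_map_of_mem hp)

theorem pv_tail_pairwise (a : String × String) (l : List (String × String))
    (h : ((a :: l).map Prod.fst).Pairwise (· < ·)) : (l.map Prod.fst).Pairwise (· < ·) := by
  rw [List.map_cons, List.pairwise_cons] at h
  exact h.2

-- characterisation of B's merge scan on strictly key-sorted inputs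
theorem pv_merge_spec (xs ys : List (String × String))
    (hx : (xs.map Prod.fst).Pairwise (· < ·)) (hy : (ys.map Prod.fst).Pairwise (· < ·)) :
    pvMerge xs ys =
      ((ys.filter (fun kv => !((PySem.Dict.mk xs).contains kv.1))).map
          (fun kv => [("path", kv.1), ("type", kv.2)]),
       (xs.filter (fun kv => !((PySem.Dict.mk ys).contains kv.1))).map
          (fun kv => [("path", kv.1), ("type", kv.2)]),
       (ys.filter (fun kv => (PySem.Dict.mk xs).contains kv.1 &&
            ((PySem.Dict.mk xs).getD kv.1 "" != kv.2))).map
          (fun kv => [("path", kv.1), ("old_type", (PySem.Dict.mk xs).getD kv.1 ""),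
            ("new_type", kv.2)])) := by
  induction xs, ys using pvMerge.induct with
  | case1 news =>
    have hc : ∀ kv : String × String,
        (PySem.Dict.mk ([] : List (String × String))).contains kv.1 = false :=
      fun kv => pv_contains_not_mem [] kv.1 (by simp)
    simp [pvMerge, hc]
  | case2 x xs =>
    have hc : ∀ kv : String × String,
        (PySem.Dict.mk ([] : List (String × String))).contains kv.1 = false :=
      fun kv => pv_contains_not_mem [] kv.1 (by simp)
    simp [pvMerge, hc]
  | case3 x xs y ys heq ih =>
    have hxt := pv_tail_pairwise x xs hx
    have hyt := pv_tail_pairwise y ys hy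
    have hxl := pv_head_lt x xs hx
    have hyl := pv_head_lt y ys hy
    have ih' := ih hxt hyt
    simp only [pvMerge, if_pos heq]
    -- rewrite the three target filters
    have hadded : ((y :: ys).filter (fun kv => !((PySem.Dict.mk (x :: xs)).contains kv.1)))
        = ys.filter (fun kv => !((PySem.Dict.mk xs).contains kv.1)) := by
      rw [List.filter_cons_of_neg (by rw [← heq, pv_contains_head]; simp)]
      exact List.filter_congr (fun kv hkv => by
        rw [pv_contains_cons_ne x xs kv.1 (by have := hyl kv hkv; rw [← heq] at this; exact (ne_of_gt this))])
    have hremoved : ((x :: xs).filter (fun kv => !((PySem.Dict.mk (y :: ys)).contains kv.1)))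
        = xs.filter (fun kv => !((PySem.Dict.mk ys).contains kv.1)) := by
      rw [List.filter_cons_of_neg (by rw [show x.1 = y.1 from heq, pv_contains_head]; simp)]
      exact List.filter_congr (fun kv hkv => by
        rw [pv_contains_cons_ne y ys kv.1 (by have := hxl kv hkv; rw [heq] at this; exact (ne_of_gt this))])
    have hchg_tail : ∀ kv ∈ ys,
        ((PySem.Dict.mk (x :: xs)).contains kv.1 = (PySem.Dict.mk xs).contains kv.1)
        ∧ ((PySem.Dict.mk (x :: xs)).getD kv.1 "" = (PySem.Dict.mk xs).getD kv.1 "") := by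
      intro kv hkv
      have hne : kv.1 ≠ x.1 := by have := hyl kv hkv; rw [← heq] at this; exact (ne_of_gt this)
      exact ⟨pv_contains_cons_ne x xs kv.1 hne, pv_getD_cons_ne x xs kv.1 "" hne⟩
    have hchg : ((y :: ys).filter (fun kv => (PySem.Dict.mk (x :: xs)).contains kv.1 &&
            ((PySem.Dict.mk (x :: xs)).getD kv.1 "" != kv.2))).map
          (fun kv => [("path", kv.1), ("old_type", (PySem.Dict.mk (x :: xs)).getD kv.1 ""),
            ("new_type", kv.2)])
        = (if x.2 ≠ y.2 then [("path", x.1), ("old_type", x.2), ("new_type", y.2)] ::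
              (ys.filter (fun kv => (PySem.Dict.mk xs).contains kv.1 &&
                ((PySem.Dict.mk xs).getD kv.1 "" != kv.2))).map
                (fun kv => [("path", kv.1), ("old_type", (PySem.Dict.mk xs).getD kv.1 ""),
                  ("new_type", kv.2)])
            else (ys.filter (fun kv => (PySem.Dict.mk xs).contains kv.1 &&
                ((PySem.Dict.mk xs).getD kv.1 "" != kv.2))).map
                (fun kv => [("path", kv.1), ("old_type", (PySem.Dict.mk xs).getD kv.1 ""),
                  ("new_type", kv.2)])) := by
      have hgy : (PySem.Dict.mk (x :: xs)).getD y.1 "" = x.2 := by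
        rw [← heq]; exact pv_getD_head x xs ""
      have htail : (ys.filter (fun kv => (PySem.Dict.mk (x :: xs)).contains kv.1 &&
            ((PySem.Dict.mk (x :: xs)).getD kv.1 "" != kv.2))).map
          (fun kv => [("path", kv.1), ("old_type", (PySem.Dict.mk (x :: xs)).getD kv.1 ""),
            ("new_type", kv.2)])
          = (ys.filter (fun kv => (PySem.Dict.mk xs).contains kv.1 &&
              ((PySem.Dict.mk xs).getD kv.1 "" != kv.2))).map
            (fun kv => [("path", kv.1), ("old_type", (PySem.Dict.mk xs).getD kv.1 ""),
              ("new_type", kv.2)]) := by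
        rw [List.filter_congr (fun kv hkv => by rw [(hchg_tail kv hkv).1, (hchg_tail kv hkv).2])]
        exact List.map_congr_left (fun kv hkv => by
          rw [(hchg_tail kv (List.mem_of_mem_filter hkv)).2])
      by_cases hv : x.2 = y.2
      · rw [if_neg (by simp [hv]), List.filter_cons_of_neg
          (by rw [hgy]; simp [hv]), htail]
      · rw [if_pos hv, List.filter_cons_of_pos
          (by rw [hgy, ← heq, pv_contains_head]; simp [hv]), List.map_cons, hgy, ← heq, htail]
    rw [ih', hadded, hremoved, hchg]
  | case4 x xs y ys heq hlt ih =>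
    have hxt := pv_tail_pairwise x xs hx
    have hxl := pv_head_lt x xs hx
    have hyl := pv_head_lt y ys hy
    have ih' := ih hxt hy
    simp only [pvMerge, if_neg heq, if_pos hlt]
    have hfy : ∀ kv ∈ (y :: ys), kv.1 ≠ x.1 := by
      intro kv hkv
      rcases List.mem_cons.1 hkv with rfl | h'
      · exact (ne_of_gt hlt)
      · exact (ne_of_gt (lt_trans hlt (hyl kv h')))
    have hadded : ((y :: ys).filter (fun kv => !((PySem.Dict.mk (x :: xs)).contains kv.1)))
        = (y :: ys).filter (fun kv => !((PySem.Dict.mk xs).contains kv.1)) :=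
      List.filter_congr (fun kv hkv => by rw [pv_contains_cons_ne x xs kv.1 (hfy kv hkv)])
    have hremoved : ((x :: xs).filter (fun kv => !((PySem.Dict.mk (y :: ys)).contains kv.1)))
        = x :: xs.filter (fun kv => !((PySem.Dict.mk (y :: ys)).contains kv.1)) := by
      rw [List.filter_cons_of_pos (by
        rw [pv_contains_not_mem (y :: ys) x.1 (fun p hp => hfy p hp)]; simp)]
    have hchg : ((y :: ys).filter (fun kv => (PySem.Dict.mk (x :: xs)).contains kv.1 &&
            ((PySem.Dict.mk (x :: xs)).getD kv.1 "" != kv.2))).map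
          (fun kv => [("path", kv.1), ("old_type", (PySem.Dict.mk (x :: xs)).getD kv.1 ""),
            ("new_type", kv.2)])
        = ((y :: ys).filter (fun kv => (PySem.Dict.mk xs).contains kv.1 &&
            ((PySem.Dict.mk xs).getD kv.1 "" != kv.2))).map
          (fun kv => [("path", kv.1), ("old_type", (PySem.Dict.mk xs).getD kv.1 ""),
            ("new_type", kv.2)]) := by
      rw [List.filter_congr (fun kv hkv => by
        rw [pv_contains_cons_ne x xs kv.1 (hfy kv hkv), pv_getD_cons_ne x xs kv.1 "" (hfy kv hkv)])]
      exact List.map_congr_left (fun kv hkv => by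
        rw [pv_getD_cons_ne x xs kv.1 "" (hfy kv (List.mem_of_mem_filter hkv))])
    rw [ih', hadded, hremoved, hchg, List.map_cons]
  | case5 x xs y ys heq hlt ih =>
    have hyt := pv_tail_pairwise y ys hy
    have hxl := pv_head_lt x xs hx
    have hyl := pv_head_lt y ys hy
    have ih' := ih hx hyt
    simp only [pvMerge, if_neg heq, if_neg hlt]
    have hgt : y.1 < x.1 := by
      rcases lt_trichotomy x.1 y.1 with h | h | h
      · exact absurd h hlt
      · exact absurd h heq
      · exact h
    have hfx : ∀ kv ∈ (x :: xs), kv.1 ≠ y.1 := by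
      intro kv hkv
      rcases List.mem_cons.1 hkv with rfl | h'
      · exact (ne_of_gt hgt)
      · exact (ne_of_gt (lt_trans hgt (hxl kv h')))
    have hadded : ((y :: ys).filter (fun kv => !((PySem.Dict.mk (x :: xs)).contains kv.1)))
        = y :: ys.filter (fun kv => !((PySem.Dict.mk (x :: xs)).contains kv.1)) := by
      rw [List.filter_cons_of_pos (by
        rw [pv_contains_not_mem (x :: xs) y.1 (fun p hp => hfx p hp)]; simp)]
    have hremoved : ((x :: xs).filter (fun kv => !((PySem.Dict.mk (y :: ys)).contains kv.1)))
        = (x :: xs).filter (fun kv => !((PySem.Dict.mk ys).contains kv.1)) :=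
      List.filter_congr (fun kv hkv => by rw [pv_contains_cons_ne y ys kv.1 (hfx kv hkv)])
    have hchg : ((y :: ys).filter (fun kv => (PySem.Dict.mk (x :: xs)).contains kv.1 &&
            ((PySem.Dict.mk (x :: xs)).getD kv.1 "" != kv.2)))
        = ys.filter (fun kv => (PySem.Dict.mk (x :: xs)).contains kv.1 &&
            ((PySem.Dict.mk (x :: xs)).getD kv.1 "" != kv.2)) := by
      rw [List.filter_cons_of_neg (by
        rw [pv_contains_not_mem (x :: xs) y.1 (fun p hp => hfx p hp)]; simp)]
    rw [ih', hadded, hremoved, hchg, List.map_cons]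

-- A's "added"/"removed": sorted set difference mapped = path-sort of a classifying filter
theorem pv_one_sided (base other : List (String × String))
    (hB : (base.map Prod.fst).Nodup) :
    PySem.List.sorted
      ((base.filter (fun kv => !((PySem.Dict.mk other).contains kv.1))).map
        (fun kv => [("path", kv.1), ("type", kv.2)])) pvPathKey false
    = ((PySem.List.sorted (PySem.Set.diff (base.map Prod.fst) (other.map Prod.fst)) (fun x => x) false).map
        (fun p => [("path", p), ("type", (PySem.Dict.mk base).getD p "")])) := by
  apply pv_sorted_records
  · exact pv_sorted_lt _ (PySem.Set.nodup_diff _ _ hB)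
  · intro k _
    exact pv_key_eval k _
  · have h1 : ((base.filter (fun kv => !((PySem.Dict.mk other).contains kv.1))).map
        (fun kv => [("path", kv.1), ("type", kv.2)]))
        = ((base.filter (fun kv => !((PySem.Dict.mk other).contains kv.1))).map Prod.fst).map
            (fun p => [("path", p), ("type", (PySem.Dict.mk base).getD p "")]) := by
      rw [List.map_map]
      apply List.map_congr_left
      intro kv hkv
      rw [Function.comp_apply, pv_getD_self base hB kv (List.mem_of_mem_filter hkv)]
    rw [h1]
    have hkp : ((base.filter (fun kv => !((PySem.Dict.mk other).contains kv.1))).map Prod.fst).Perm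
        (PySem.Set.diff (base.map Prod.fst) (other.map Prod.fst)) := by
      rw [List.perm_ext_iff_of_nodup
        (hB.sublist (List.filter_sublist.map _))
        (PySem.Set.nodup_diff _ _ hB)]
      intro x
      simp only [List.mem_map, List.mem_filter, PySem.Set.mem_diff, Bool.not_eq_true']
      constructor
      · rintro ⟨kv, ⟨hkv, hc⟩, rfl⟩
        exact ⟨⟨kv, hkv, rfl⟩, fun hmem =>
          absurd ((pv_contains_iff other kv.1).2 hmem) (by simp [hc])⟩
      · rintro ⟨hxB, hxO⟩
        obtain ⟨kv, hkv, rfl⟩ := hxB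
        refine ⟨kv, ⟨hkv, ?_⟩, rfl⟩
        by_contra hc
        exact hxO ((pv_contains_iff other kv.1).1 (by simpa using hc))
    exact ((PySem.List.sorted_perm _ _ _).map _).trans (hkp.map _).symm

-- A's "type_changed": sorted intersection, filtered and mapped = path-sort of a classifying filter
theorem pv_type_changed (old_schema new_schema : List (String × String))
    (hO : (old_schema.map Prod.fst).Nodup) (hN : (new_schema.map Prod.fst).Nodup) :
    PySem.List.sorted
      ((new_schema.filter (fun kv => (PySem.Dict.mk old_schema).contains kv.1 &&
          ((PySem.Dict.mk old_schema).getD kv.1 "" != kv.2))).map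
        (fun kv => [("path", kv.1), ("old_type", (PySem.Dict.mk old_schema).getD kv.1 ""), ("new_type", kv.2)]))
      pvPathKey false
    = (((PySem.List.sorted (PySem.Set.inter (old_schema.map Prod.fst) (new_schema.map Prod.fst)) (fun x => x) false).filter
          (fun k => (PySem.Dict.mk old_schema).getD k "" != (PySem.Dict.mk new_schema).getD k "")).map
        (fun k => [("path", k), ("old_type", (PySem.Dict.mk old_schema).getD k ""),
          ("new_type", (PySem.Dict.mk new_schema).getD k "")])) := by
  apply pv_sorted_records
  · exact (pv_sorted_lt _ (PySem.Set.nodup_inter _ _ hO)).sublist List.filter_sublist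
  · intro k _
    exact pv_key_eval k _
  · have h1 : ((new_schema.filter (fun kv => (PySem.Dict.mk old_schema).contains kv.1 &&
          ((PySem.Dict.mk old_schema).getD kv.1 "" != kv.2))).map
        (fun kv => [("path", kv.1), ("old_type", (PySem.Dict.mk old_schema).getD kv.1 ""), ("new_type", kv.2)]))
        = ((new_schema.filter (fun kv => (PySem.Dict.mk old_schema).contains kv.1 &&
            ((PySem.Dict.mk old_schema).getD kv.1 "" != kv.2))).map Prod.fst).map
            (fun k => [("path", k), ("old_type", (PySem.Dict.mk old_schema).getD k ""),
              ("new_type", (PySem.Dict.mk new_schema).getD k "")]) := by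
      rw [List.map_map]
      apply List.map_congr_left
      intro kv hkv
      rw [Function.comp_apply, pv_getD_self new_schema hN kv (List.mem_of_mem_filter hkv)]
    rw [h1]
    have hkp : ((new_schema.filter (fun kv => (PySem.Dict.mk old_schema).contains kv.1 &&
          ((PySem.Dict.mk old_schema).getD kv.1 "" != kv.2))).map Prod.fst).Perm
        ((PySem.Set.inter (old_schema.map Prod.fst) (new_schema.map Prod.fst)).filter
          (fun k => (PySem.Dict.mk old_schema).getD k "" != (PySem.Dict.mk new_schema).getD k "")) := by
      rw [List.perm_ext_iff_of_nodup
        (hN.sublist (List.filter_sublist.map _))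
        ((PySem.Set.nodup_inter _ _ hO).filter _)]
      intro x
      simp only [List.mem_map, List.mem_filter, PySem.Set.mem_inter, Bool.and_eq_true, bne_iff_ne]
      constructor
      · rintro ⟨kv, ⟨hkv, hc, hne⟩, rfl⟩
        have hv := pv_getD_self new_schema hN kv hkv
        exact ⟨⟨(pv_contains_iff old_schema kv.1).1 hc, ⟨kv, hkv, rfl⟩⟩, by rw [hv]; exact hne⟩
      · rintro ⟨⟨hxO, hxN⟩, hne⟩
        obtain ⟨kv, hkv, rfl⟩ := hxN
        have hv := pv_getD_self new_schema hN kv hkv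
        refine ⟨kv, ⟨hkv, (pv_contains_iff old_schema kv.1).2 hxO, ?_⟩, rfl⟩
        rw [hv] at hne
        exact hne
    have hsp : ((PySem.List.sorted (PySem.Set.inter (old_schema.map Prod.fst) (new_schema.map Prod.fst)) (fun x => x) false).filter
          (fun k => (PySem.Dict.mk old_schema).getD k "" != (PySem.Dict.mk new_schema).getD k "")).Perm
        ((PySem.Set.inter (old_schema.map Prod.fst) (new_schema.map Prod.fst)).filter
          (fun k => (PySem.Dict.mk old_schema).getD k "" != (PySem.Dict.mk new_schema).getD k "")) :=
      (PySem.List.sorted_perm _ _ _).filter _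
    exact (hsp.map _).trans (hkp.map _).symm

-- B-side shape: path-sort of (filter of the source, mapped) = the same filter over the key-sorted source, mapped
theorem pv_b_side (src ssrc : List (String × String)) (hperm : ssrc.Perm src)
    (hpw : ssrc.Pairwise (fun a b => a.1 < b.1)) (p : String × String → Bool)
    (g : String × String → List (String × String)) (hkey : ∀ kv, pvPathKey (g kv) = kv.1) :
    PySem.List.sorted ((src.filter p).map g) pvPathKey false = (ssrc.filter p).map g := by
  apply PySem.List.sorted_eq_of_perm_of_pairwise_lt _ _ pvPathKey ((hperm.filter p).map g)
  rw [List.pairwise_map]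
  exact (hpw.sublist List.filter_sublist).imp (fun h => by rw [hkey, hkey]; exact h)

-- ===== VERDICT (by name: the statement is the Claim_ definition above) =====
theorem diff_schemas_py_spec : Claim_equal_diff_schemas_py := by
  intro old_schema new_schema _ hPre
  obtain ⟨hO, hN⟩ := hPre
  unfold Spec_diff_schemas_py diff_schemas_py diff_schemas_py_alt
  dsimp only
  have hpo : (PySem.List.sorted old_schema (fun kv => kv.1) false).Perm old_schema :=
    PySem.List.sorted_perm _ _ _
  have hpn : (PySem.List.sorted new_schema (fun kv => kv.1) false).Perm new_schema :=
    PySem.List.sorted_perm _ _ _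
  have hndo : ((PySem.List.sorted old_schema (fun kv => kv.1) false).map Prod.fst).Nodup :=
    ((hpo.map Prod.fst).nodup_iff).2 hO
  have hndn : ((PySem.List.sorted new_schema (fun kv => kv.1) false).map Prod.fst).Nodup :=
    ((hpn.map Prod.fst).nodup_iff).2 hN
  have hox : ((PySem.List.sorted old_schema (fun kv => kv.1) false).map Prod.fst).Pairwise (· < ·) :=
    pv_pairwise_lt_of_le_nodup _ (PySem.List.sorted_map_key_pairwise _ _) hndo
  have hnx : ((PySem.List.sorted new_schema (fun kv => kv.1) false).map Prod.fst).Pairwise (· < ·) :=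
    pv_pairwise_lt_of_le_nodup _ (PySem.List.sorted_map_key_pairwise _ _) hndn
  rw [pv_merge_spec _ _ hox hnx]
  have hca : ∀ k, (PySem.Dict.mk (PySem.List.sorted old_schema (fun kv => kv.1) false)).contains k
      = (PySem.Dict.mk old_schema).contains k := pv_dict_perm_contains _ _ hpo
  have hga : ∀ k, (PySem.Dict.mk (PySem.List.sorted old_schema (fun kv => kv.1) false)).getD k ""
      = (PySem.Dict.mk old_schema).getD k "" := pv_dict_perm_getD _ _ hpo hndo
  have hcn : ∀ k, (PySem.Dict.mk (PySem.List.sorted new_schema (fun kv => kv.1) false)).contains k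
      = (PySem.Dict.mk new_schema).contains k := pv_dict_perm_contains _ _ hpn
  simp only [hca, hga, hcn]
  simp only [PySem.Dict.keys_mk, PySem.Set.ofList_eq_self_of_nodup _ hO,
    PySem.Set.ofList_eq_self_of_nodup _ hN]
  rw [← pv_one_sided new_schema old_schema hN, ← pv_one_sided old_schema new_schema hO,
    ← pv_type_changed old_schema new_schema hO hN,
    pv_b_side new_schema _ hpn (List.pairwise_map.mp hnx) _ _ (fun kv => pv_key_eval kv.1 _),
    pv_b_side old_schema _ hpo (List.pairwise_map.mp hox) _ _ (fun kv => pv_key_eval kv.1 _),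
    pv_b_side new_schema _ hpn (List.pairwise_map.mp hnx) _ _ (fun kv => pv_key_eval kv.1 _)]
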